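-- pv_equiv track=rewrite | github.com/r3j0/BOJ | 백준/Bronze/6679. 싱기한 네자리 숫자/싱기한 네자리 숫자.py | twl
-- ===== SOURCE A (Python) =====
-- def twl(num):
--     string = ""
--     now = num
--     while num >= 1:
--         now = num % 12
--         if now >= 10:
--             now = chr(ord('a') + (now - 10))
--         string += str(now)
--
--         num //= 12
--     if num != 0: string += str(num)
--     return string[::-1]
-- ===== SOURCE B (Python) =====
-- def twl(num):
--     if num < 1:
--         return ""
--     v = num % 12
--     d = chr(ord('a') + v - 10) if v >= 10 else str(v)
--     return twl(num // 12) + d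
-- ===== Notes on version B (the rewrite author's own statement) =====
-- stated objective: simpler
-- what changed: Replaced the LSB-first while loop with string accumulation and a final reversal by a direct recursion that emits digits most-significant-first, needing no accumulator and no reversal.
-- intended difference: For negative num A's loop never runs and the trailing 'if num != 0' appends str(num) which then gets reversed, so A returns e.g. '5-' for -5; B returns '' there, the intended value since negative inputs have no base-12 representation and A's reversed decimal string is an accident of its implementation. — e.g. on twl(-5): A returns "5-", B returns ""
import Mathlib
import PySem

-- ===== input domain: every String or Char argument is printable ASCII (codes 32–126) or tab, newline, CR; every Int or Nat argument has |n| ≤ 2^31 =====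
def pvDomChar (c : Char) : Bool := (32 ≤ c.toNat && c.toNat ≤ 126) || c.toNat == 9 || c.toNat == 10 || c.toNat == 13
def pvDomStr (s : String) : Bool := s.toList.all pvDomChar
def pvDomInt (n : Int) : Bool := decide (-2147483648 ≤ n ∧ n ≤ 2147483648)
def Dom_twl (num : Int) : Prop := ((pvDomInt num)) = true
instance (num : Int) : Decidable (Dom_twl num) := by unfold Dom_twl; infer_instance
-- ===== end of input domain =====

-- B replaces A's LSB-first while loop + final reversal by a direct MSB-first recursion (no accumulator, no reversal).
-- On negative inputs A returns the reversed decimal string (e.g. "5-"), an accident; B returns "" there (see D_twl).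


-- ===== PORT A =====
-- the while loop: returns (string, num) after the loop; chars kept as List Char (PySem.Chars side)
def twlLoop (num : Int) (string : List Char) : List Char × Int :=
  if num ≥ 1 then
    -- now = num % 12; if now >= 10: now = chr(ord('a') + (now - 10)); string += str(now)
    let now := PySem.Int.mod num 12
    let d : List Char :=
      if now ≥ 10 then [Char.ofNat ('a'.toNat + (now - 10).toNat)]
      else PySem.Int.toChars now
    twlLoop (PySem.Int.floordiv num 12) (string ++ d)
  else (string, num)
termination_by num.toNat
decreasing_by
  rw [PySem.Int.floordiv_eq_ediv_of_pos (by omega : (0:Int) < 12)]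
  omega

def twl (num : Int) : String :=
  let p := twlLoop num []
  let s := if p.2 ≠ 0 then p.1 ++ PySem.Int.toChars p.2 else p.1
  -- string[::-1] is reverse (PySem.List.slice?_none_none_neg_one)
  String.ofList s.reverse

-- ===== PORT B =====
-- d = chr(ord('a') + v - 10) if v >= 10 else str(v)
def twlDigit (v : Int) : String :=
  if v ≥ 10 then String.ofList [Char.ofNat ('a'.toNat + (v - 10).toNat)]
  else PySem.Int.toStr v

def twl_alt (num : Int) : String :=
  if num < 1 then ""
  else twl_alt (PySem.Int.floordiv num 12) ++ twlDigit (PySem.Int.mod num 12)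
termination_by num.toNat
decreasing_by
  rw [PySem.Int.floordiv_eq_ediv_of_pos (by omega : (0:Int) < 12)]
  omega

-- ===== PRECONDITION & SPEC =====
-- For negative num A returns str(num) reversed (e.g. "5-" for -5), an accident of its trailing
-- 'if num != 0' branch; B returns "" there, the intended value for inputs with no base-12 digits.
def D_twl (num : Int) : Prop := num < 0
instance (num : Int) : Decidable (D_twl num) := by unfold D_twl; infer_instance
def Spec_twl (num : Int) (out : String) : Prop := ¬ D_twl num → out = twl_alt num
instance (num : Int) (out : String) : Decidable (Spec_twl num out) := by unfold Spec_twl; infer_instance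
def pvDiffWitness_twl : Int := (-5)
def pvDiffWitnessOut_twl : String × String := ("5-", "")

-- ===== CLAIM (what is proved, stated in full; the proofs are below) =====
def Claim_unchanged_twl : Prop := ∀ (num : Int), Dom_twl num → Spec_twl num (twl num)
def Claim_changed_twl : Prop := Dom_twl (pvDiffWitness_twl) ∧ D_twl (pvDiffWitness_twl) ∧ twl (pvDiffWitness_twl) = pvDiffWitnessOut_twl.1 ∧ twl_alt (pvDiffWitness_twl) = pvDiffWitnessOut_twl.2 ∧ pvDiffWitnessOut_twl.1 ≠ pvDiffWitnessOut_twl.2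
def Claim_exact_twl : Prop := ∀ (num : Int), Dom_twl num → D_twl num → twl num ≠ twl_alt num

-- ===== LEMMAS AND PROOFS =====
-- the characters of B's result, as a list
lemma twl_alt_toList (num : Int) :
    (twl_alt num).toList =
      (if num < 1 then [] else
        (twl_alt (PySem.Int.floordiv num 12)).toList ++ (twlDigit (PySem.Int.mod num 12)).toList) := by
  rw [twl_alt]
  split_ifs <;> simp [String.toList_append]

-- each appended digit is a single character
lemma digit_single (num : Int) (_h : 1 ≤ num) :
    ∃ c, (twlDigit (PySem.Int.mod num 12)).toList = [c] ∧
      (if PySem.Int.mod num 12 ≥ 10 then [Char.ofNat ('a'.toNat + (PySem.Int.mod num 12 - 10).toNat)]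
       else PySem.Int.toChars (PySem.Int.mod num 12)) = [c] := by
  have h0 : 0 ≤ PySem.Int.mod num 12 := PySem.Int.mod_nonneg num (by omega)
  have h1 : PySem.Int.mod num 12 < 12 := PySem.Int.mod_lt num (by omega)
  set v := PySem.Int.mod num 12 with hv
  clear_value v
  interval_cases v <;> exact ⟨_, rfl, by decide⟩

-- loop invariant: for nonnegative num the loop ends with num = 0 and B's digits appended LSB-first
lemma twlLoop_eq (num : Int) (s : List Char) (h0 : 0 ≤ num) :
    twlLoop num s = (s ++ ((twl_alt num).toList).reverse, 0) := by
  revert h0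
  induction num, s using twlLoop.induct with
  | case1 num s hge now d ih =>
    intro _
    rw [twlLoop]
    simp only [hge, if_true]
    have hpos : 0 ≤ PySem.Int.floordiv num 12 := by
      rw [PySem.Int.floordiv_eq_ediv_of_pos (by omega : (0:Int) < 12)]
      omega
    obtain ⟨c, hcd, hc⟩ := digit_single num hge
    have hd : d = [c] := hc
    have ih' := ih hpos
    rw [hd] at ih'
    rw [hc, ih']
    rw [twl_alt_toList num]
    simp only [show ¬ num < 1 by omega, if_false, hcd]
    simp
  | case2 num s hge =>
    intro h0
    rw [twlLoop]
    simp only [hge, if_false]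
    rw [twl_alt]
    have : num = 0 := by omega
    simp [this]

-- the witness values, computed by unfolding one loop step
lemma twl_witness : twl (-5) = "5-" := by
  have h : twlLoop (-5) [] = ([], -5) := by rw [twlLoop]; norm_num
  simp [twl, h]
  decide

lemma twl_alt_witness : twl_alt (-5) = "" := by rw [twl_alt]; norm_num

-- ===== VERDICT (by name: the statement is the Claim_ definition above) =====
theorem twl_spec : Claim_unchanged_twl := by
  intro num _ hD
  have h0 : 0 ≤ num := by unfold D_twl at hD; omega
  unfold Spec_twl at *
  unfold twl
  rw [twlLoop_eq num [] h0]
  simp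

theorem twl_changed : Claim_changed_twl := by
  unfold Claim_changed_twl
  exact ⟨by decide, by decide, twl_witness, twl_alt_witness, by decide⟩

theorem twl_tight : Claim_exact_twl := by
  intro num _ hD
  unfold D_twl at hD
  have hL : twlLoop num [] = ([], num) := by
    rw [twlLoop]; simp [show ¬ num ≥ 1 by omega]
  have hA : twl num = String.ofList ((PySem.Int.toChars num).reverse) := by
    simp only [twl, hL]
    simp [show num ≠ 0 by omega]
  have hB : twl_alt num = "" := by
    rw [twl_alt]; simp [show num < 1 by omega]
  have hc : PySem.Int.toChars num = '-' :: Nat.toDigits 10 num.natAbs := by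
    unfold PySem.Int.toChars; simp [show num < 0 by omega]
  rw [hA, hB]
  intro hEq
  have := congrArg String.toList hEq
  simp [hc] at this
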